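-- pv_equiv track=rewrite | github.com/kschoff107/Interactive | backend/parsers/routes/gin_parser.py | _resolve_group_prefixes
-- ===== SOURCE A (Python) =====
-- from typing import Dict, List, Optional, Tuple
--
-- def _resolve_group_prefixes(group_vars: Dict[str, Dict],
--                             router_vars: Dict[str, str]) -> Dict[str, str]:
--     """Resolve full path prefix for each group by walking the parent chain."""
--     prefixes: Dict[str, str] = {}
--
--     def resolve(var_name: str) -> str:
--         if var_name in prefixes:
--             return prefixes[var_name]
--         if var_name in router_vars:
--             return ''
--         info = group_vars.get(var_name)
--         if not info:
--             return ''
--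
--         parent_prefix = resolve(info['parent'])
--         full = f'{parent_prefix}{info["path"]}'.rstrip('/')
--         prefixes[var_name] = full
--         return full
--
--     for var_name in group_vars:
--         resolve(var_name)
--
--     return prefixes
-- ===== SOURCE B (Python) =====
-- from typing import Dict
--
-- def _resolve_group_prefixes(group_vars: Dict[str, Dict],
--                             router_vars: Dict[str, str]) -> Dict[str, str]:
--     """Iterative version: climb the parent chain to a known frontier, then
--     replay it top-down, memoizing each prefix along the way."""
--     prefixes: Dict[str, str] = {}
--
--     for var_name in group_vars:
--         if var_name in prefixes:
--             continue
--         # climb: collect the unresolved ancestors of var_name (self first);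
--         # fuel bounds the climb so a cyclic parent chain (on which the
--         # recursive version raises RecursionError) cannot loop forever
--         fuel = len(group_vars) + 1
--         chain = []
--         node = var_name
--         while fuel and node not in prefixes and node not in router_vars and group_vars.get(node):
--             fuel -= 1
--             chain.append(node)
--             node = group_vars[node]['parent']
--         # replay: frontier prefix is memoized value or '' for the base cases
--         prefix = prefixes.get(node, '')
--         for name in reversed(chain):
--             prefix = f"{prefix}{group_vars[name]['path']}".rstrip('/')
--             prefixes[name] = prefix
--
--     return prefixes
-- ===== Notes on version B (the rewrite author's own statement) =====
-- stated objective: alternative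
-- what changed: Replaces the memoized recursive resolver with an iterative two-phase traversal: climb the parent chain to the first memoized/base frontier collecting the unresolved ancestors, then replay the chain top-down, re-applying rstrip('/') and memoizing each prefix in the same order the recursion would.
import Mathlib
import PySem

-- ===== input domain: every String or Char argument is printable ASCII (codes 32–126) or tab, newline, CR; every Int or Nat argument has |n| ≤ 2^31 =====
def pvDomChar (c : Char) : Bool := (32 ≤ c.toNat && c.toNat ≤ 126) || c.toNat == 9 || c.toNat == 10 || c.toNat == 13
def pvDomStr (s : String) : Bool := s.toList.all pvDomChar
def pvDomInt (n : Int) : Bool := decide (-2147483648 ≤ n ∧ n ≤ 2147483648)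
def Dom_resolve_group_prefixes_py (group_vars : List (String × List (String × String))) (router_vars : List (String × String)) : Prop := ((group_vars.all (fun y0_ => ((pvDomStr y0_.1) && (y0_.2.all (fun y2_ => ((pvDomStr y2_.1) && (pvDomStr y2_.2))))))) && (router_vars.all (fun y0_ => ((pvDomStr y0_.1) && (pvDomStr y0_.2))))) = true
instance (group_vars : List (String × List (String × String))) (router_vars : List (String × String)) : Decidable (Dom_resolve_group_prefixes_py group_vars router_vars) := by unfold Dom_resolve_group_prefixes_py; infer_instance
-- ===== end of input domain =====

-- B replaces A's memoized recursion by an iterative climb-then-replay traversal of the parent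
-- chain (objective: alternative decomposition, same cost).

-- shared primitive: exact port of Python's s.rstrip('/') — drop the trailing '/' characters
def pyRstripSlash (s : String) : String :=
  String.ofList ((s.toList.reverse.dropWhile (fun c => c == '/')).reverse)

-- ===== PORT A =====
-- A's inner `resolve`: memoized recursion up the parent chain; the Nat fuel only makes the
-- recursion structural (Pre_ guarantees it never runs out where the claim speaks).
def resolveA (g : PySem.Dict String (List (String × String))) (r : PySem.Dict String String) :
    Nat → PySem.Dict String String → String → String × PySem.Dict String String
  | 0, memo, _ => ("", memo)
  | fuel+1, memo, n =>
    if memo.contains n then ((memo.get? n).getD "", memo)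
    else if r.contains n then ("", memo)
    else
      match g.get? n with
      | none => ("", memo)
      | some info =>
        if info = [] then ("", memo)
        else
          let infod := PySem.Dict.ofList info
          let res := resolveA g r fuel memo (infod.getD "parent" "")
          let full := pyRstripSlash (res.1 ++ infod.getD "path" "")
          (full, res.2.insert n full)

def resolve_group_prefixes_py (group_vars : List (String × List (String × String))) (router_vars : List (String × String)) : List (String × String) :=
  let g := PySem.Dict.ofList group_vars
  let r := PySem.Dict.ofList router_vars
  (g.keys.foldl (fun memo n => (resolveA g r (g.items.length + 1) memo n).2) PySem.Dict.empty).items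

-- ===== PORT B =====
-- B's climb loop: follow the parent chain collecting unresolved nodes until a memoized or base
-- frontier; returns (chain, frontier node).  fuel ports B's explicit depth guard.
def climbB (g : PySem.Dict String (List (String × String))) (r : PySem.Dict String String)
    (memo : PySem.Dict String String) : Nat → String → List String × String
  | 0, node => ([], node)
  | fuel+1, node =>
    if memo.contains node then ([], node)
    else if r.contains node then ([], node)
    else
      match g.get? node with
      | none => ([], node)
      | some info =>
        if info = [] then ([], node)
        else
          let rest := climbB g r memo fuel ((PySem.Dict.ofList info).getD "parent" "")
          (node :: rest.1, rest.2)

-- B's replay step: extend the running prefix with this group's path, rstrip, memoize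
def stepRB (g : PySem.Dict String (List (String × String)))
    (acc : String × PySem.Dict String String) (name : String) :
    String × PySem.Dict String String :=
  let full := pyRstripSlash (acc.1 ++ (PySem.Dict.ofList (g.getD name [])).getD "path" "")
  (full, acc.2.insert name full)

def resolve_group_prefixes_py_alt (group_vars : List (String × List (String × String))) (router_vars : List (String × String)) : List (String × String) :=
  let g := PySem.Dict.ofList group_vars
  let r := PySem.Dict.ofList router_vars
  (g.keys.foldl
    (fun memo n =>
      if memo.contains n then memo
      else
        let c := climbB g r memo (g.items.length + 1) n
        (c.1.reverse.foldl (stepRB g) (memo.getD c.2 "", memo)).2)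
    PySem.Dict.empty).items

-- ===== PRECONDITION & SPEC =====
-- one step up the parent chain: the 'parent' entry of a group's info (resp. '' at a base)
def pvParentStep (g : PySem.Dict String (List (String × String))) (n : String) : String :=
  (PySem.Dict.ofList (g.getD n [])).getD "parent" ""

-- a base case of the chain: a router var, an absent group, or a group with empty info
def pvChainBase (g : PySem.Dict String (List (String × String))) (r : PySem.Dict String String)
    (n : String) : Bool :=
  r.contains n || g.getD n [] == []

-- Pre_: exactly the inputs on which Python A returns — every group entry that is actually
-- resolved carries the 'parent' and 'path' keys (else A raises KeyError), and every parent
-- chain reaches a base case within |group_vars| steps, i.e. no chain is cyclic (else A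
-- raises RecursionError).
def Pre_resolve_group_prefixes_py (group_vars : List (String × List (String × String))) (router_vars : List (String × String)) : Prop :=
  (∀ p ∈ (PySem.Dict.ofList group_vars).items,
      (PySem.Dict.ofList router_vars).contains p.1 = false → p.2 ≠ [] →
      (PySem.Dict.ofList p.2).contains "parent" = true ∧ (PySem.Dict.ofList p.2).contains "path" = true)
  ∧ (∀ k ∈ (PySem.Dict.ofList group_vars).keys,
      ∃ d ∈ List.range ((PySem.Dict.ofList group_vars).items.length + 1),
        pvChainBase (PySem.Dict.ofList group_vars) (PySem.Dict.ofList router_vars)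
          ((pvParentStep (PySem.Dict.ofList group_vars))^[d] k) = true)

instance (group_vars : List (String × List (String × String))) (router_vars : List (String × String)) : Decidable (Pre_resolve_group_prefixes_py group_vars router_vars) := by unfold Pre_resolve_group_prefixes_py; infer_instance

def pvWitness_resolve_group_prefixes_py : (List (String × List (String × String))) × (List (String × String)) :=
  ([("api", [("parent", "root"), ("path", "/api/")]), ("root", [("parent", "x"), ("path", "/v1")])], [("x", "")])

def Spec_resolve_group_prefixes_py (group_vars : List (String × List (String × String))) (router_vars : List (String × String)) (out : List (String × String)) : Prop := out = resolve_group_prefixes_py_alt group_vars router_vars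
instance (group_vars : List (String × List (String × String))) (router_vars : List (String × String)) (out : List (String × String)) : Decidable (Spec_resolve_group_prefixes_py group_vars router_vars out) := by unfold Spec_resolve_group_prefixes_py; infer_instance

-- ===== CLAIM (what is proved, stated in full; the proofs are below) =====
def Claim_equal_resolve_group_prefixes_py : Prop := ∀ (group_vars : List (String × List (String × String))) (router_vars : List (String × String)), Dom_resolve_group_prefixes_py group_vars router_vars → Pre_resolve_group_prefixes_py group_vars router_vars → Spec_resolve_group_prefixes_py group_vars router_vars (resolve_group_prefixes_py group_vars router_vars)

-- ===== LEMMAS AND PROOFS =====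

-- A's memoized recursion computes exactly B's climb-then-replay, pairwise (value, memo)
theorem resolveA_eq_climb_replay
    (g : PySem.Dict String (List (String × String))) (r : PySem.Dict String String) :
    ∀ (fuel : Nat) (memo : PySem.Dict String String) (n : String),
      (∃ d, d < fuel ∧ pvChainBase g r ((pvParentStep g)^[d] n) = true) →
      resolveA g r fuel memo n =
        (climbB g r memo fuel n).1.reverse.foldl (stepRB g)
          (memo.getD (climbB g r memo fuel n).2 "", memo) := by
  intro fuel
  induction fuel with
  | zero => intro memo n h; obtain ⟨d, hd, -⟩ := h; omega
  | succ f ih =>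
    intro memo n h
    by_cases hm : memo.contains n = true
    · simp [resolveA, climbB, hm, PySem.Dict.getD_eq_get?_getD]
    · simp only [Bool.not_eq_true] at hm
      by_cases hr : r.contains n = true
      · simp [resolveA, climbB, hm, hr, PySem.Dict.getD_of_not_contains _ _ hm]
      · simp only [Bool.not_eq_true] at hr
        cases hg : g.get? n with
        | none =>
          simp [resolveA, climbB, hm, hr, hg, PySem.Dict.getD_of_not_contains _ _ hm]
        | some info =>
          by_cases hi : info = []
          · simp [resolveA, climbB, hm, hr, hg, hi, PySem.Dict.getD_of_not_contains _ _ hm]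
          · have hgd : g.getD n [] = info := PySem.Dict.getD_of_get?_eq_some _ _ hg
            have hstep : pvParentStep g n = (PySem.Dict.ofList info).getD "parent" "" := by
              simp [pvParentStep, hgd]
            have hnb : pvChainBase g r n = false := by
              simp [pvChainBase, hr, hgd, hi]
            have hesc : ∃ d, d < f ∧
                pvChainBase g r ((pvParentStep g)^[d] ((PySem.Dict.ofList info).getD "parent" "")) = true := by
              obtain ⟨d, hd, hb⟩ := h
              cases d with
              | zero => rw [Function.iterate_zero_apply] at hb; rw [hnb] at hb; cases hb
              | succ d' =>
                refine ⟨d', by omega, ?_⟩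
                rw [← hstep, ← Function.iterate_succ_apply]
                exact hb
            have ihp := ih memo ((PySem.Dict.ofList info).getD "parent" "") hesc
            simp only [resolveA, climbB, hm, hr, hg, hi, Bool.false_eq_true,
              not_false_eq_true, if_neg]
            simp only [List.reverse_cons, List.foldl_append, List.foldl_cons, List.foldl_nil]
            rw [← ihp]
            simp [stepRB, PySem.Dict.getD_of_get?_eq_some _ _ hg]

-- ===== VERDICT (by name: the statement is the Claim_ definition above) =====
theorem resolve_group_prefixes_py_spec : Claim_equal_resolve_group_prefixes_py := by
  intro group_vars router_vars _hDom hPre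
  unfold Spec_resolve_group_prefixes_py resolve_group_prefixes_py resolve_group_prefixes_py_alt
  obtain ⟨-, hEsc⟩ := hPre
  dsimp only
  congr 1
  apply PySem.List.foldl_congr_mem
  intro memo n hn
  obtain ⟨d, hd, hb⟩ := hEsc n hn
  rw [List.mem_range] at hd
  have h := resolveA_eq_climb_replay (PySem.Dict.ofList group_vars) (PySem.Dict.ofList router_vars)
    ((PySem.Dict.ofList group_vars).items.length + 1) memo n ⟨d, hd, hb⟩
  by_cases hm : memo.contains n = true
  · simp [h, climbB, hm, List.foldl_nil]
  · simp only [Bool.not_eq_true] at hm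
    simp [h, hm]
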